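-- pv_equiv track=rewrite | github.com/w40141/verilog | hmac/work/1_sha256.py | make_message
-- ===== SOURCE A (Python) =====
-- def make_message(num, ):
--     # li = ['1', 'Q', 'a', 'y', 'u', 's', 'p']
--     li = ['1']
--     org = 'qqqq'
--     src = ''
--     dst = ''
--     tmp = ''
--     message = []
--     for i in range(num):
--         src += org
--         for j in range(1):
--         # for j in range(4):
--             for k in li:
--                 dst = org[:j] + k + org[j+1:]
--                 message.append(src)
--                 message.append(tmp + dst)
--         dst += org
--         tmp += org
--     return message
-- ===== SOURCE B (Python) =====
-- def make_message(num, ):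
--     full = 'q' * (4 * num)
--     message = []
--     for i in range(num):
--         message.append(full[:4 * (i + 1)])
--         message.append(full[:4 * i] + '1qqq')
--     return message
-- ===== Notes on version B (the rewrite author's own statement) =====
-- stated objective: simpler
-- what changed: B precomputes the full 'q'-backbone string once and emits prefix slices of it (plus the constant '1qqq' tail), replacing A's three running string accumulators and its two degenerate inner loops.
import Mathlib
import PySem

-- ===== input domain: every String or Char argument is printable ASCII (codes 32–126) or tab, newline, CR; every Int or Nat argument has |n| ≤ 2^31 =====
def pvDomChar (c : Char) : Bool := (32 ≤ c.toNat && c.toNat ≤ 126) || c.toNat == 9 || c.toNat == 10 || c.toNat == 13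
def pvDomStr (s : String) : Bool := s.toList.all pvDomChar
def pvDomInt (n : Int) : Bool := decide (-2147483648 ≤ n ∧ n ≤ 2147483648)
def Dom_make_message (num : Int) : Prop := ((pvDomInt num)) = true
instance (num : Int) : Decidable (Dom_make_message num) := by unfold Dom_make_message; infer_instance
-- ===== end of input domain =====

-- B replaces A's three running string accumulators (src/dst/tmp) and its two degenerate
-- inner loops by one precomputed backbone string sliced per iteration (objective: simpler).
-- Strings are carried as List Char (exact for Python str concatenation/slicing) and wrapped
-- with String.ofList when appended to the result list.

-- ===== PORT A =====
-- loop body of A's outer 'for i in range(num)': state (src, dst, tmp, message)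
def pvStepA (st : List Char × List Char × List Char × List String) (_i : Int) :
    List Char × List Char × List Char × List String :=
  let li : List (List Char) := [['1']]
  let org : List Char := ['q','q','q','q']
  let src := st.1 ++ org
  let tmp := st.2.2.1
  -- 'for j in range(1): for k in li:' over state (dst, message)
  let inner := (PySem.List.pyRange 0 1).foldl (fun st2 j =>
    li.foldl (fun st3 k =>
      let dst := PySem.List.slice org (some 0) (some j) ++ k ++
                 PySem.List.slice org (some (j+1)) none
      (dst, st3.2 ++ [String.ofList src, String.ofList (tmp ++ dst)])) st2)
    (st.2.1, st.2.2.2)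
  let dst := inner.1 ++ org
  (src, dst, tmp ++ org, inner.2)

def make_message (num : Int) : List String :=
  ((PySem.List.pyRange 0 num).foldl pvStepA ([], [], [], [])).2.2.2

-- ===== PORT B =====
-- loop body of B's 'for i in range(num)': append two prefix slices of the backbone
def pvStepB (full : List Char) (message : List String) (i : Int) : List String :=
  message ++ [String.ofList (PySem.List.slice full none (some (4*(i+1)))),
              String.ofList (PySem.List.slice full none (some (4*i)) ++ ['1','q','q','q'])]

def make_message_alt (num : Int) : List String :=
  let full : List Char := List.replicate (4*num).toNat 'q'   -- 'q' * (4*num): '' when num ≤ 0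
  (PySem.List.pyRange 0 num).foldl (pvStepB full) []

-- ===== PRECONDITION & SPEC =====
def Spec_make_message (num : Int) (out : List String) : Prop := out = make_message_alt num
instance (num : Int) (out : List String) : Decidable (Spec_make_message num out) := by unfold Spec_make_message; infer_instance

-- ===== CLAIM (what is proved, stated in full; the proofs are below) =====
def Claim_equal_make_message : Prop := ∀ (num : Int), Dom_make_message num → Spec_make_message num (make_message num)

-- ===== LEMMAS AND PROOFS =====

-- common closed form of the output
def pvF (n : Nat) : List String :=
  (List.range n).flatMap (fun k =>
    [String.ofList (List.replicate (4*(k+1)) 'q'),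
     String.ofList (List.replicate (4*k) 'q' ++ ['1','q','q','q'])])

def pvDstA (n : Nat) : List Char :=
  if n = 0 then [] else ['1','q','q','q','q','q','q','q']

theorem pvF_succ (n : Nat) : pvF (n+1) = pvF n ++
    [String.ofList (List.replicate (4*(n+1)) 'q'),
     String.ofList (List.replicate (4*n) 'q' ++ ['1','q','q','q'])] := by
  simp [pvF, List.range_succ]

theorem rep_add_four (n : Nat) :
    List.replicate (4*n) 'q' ++ ['q','q','q','q'] = List.replicate (4*(n+1)) 'q' := by
  have : (4*(n+1)) = 4*n + 4 := by ring
  rw [this, List.replicate_add]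
  rfl

theorem loopA (n : Nat) :
    (PySem.List.pyRange 0 (n:Int)).foldl pvStepA ([], [], [], []) =
      (List.replicate (4*n) 'q', pvDstA n, List.replicate (4*n) 'q', pvF n) := by
  induction n with
  | zero => decide
  | succ n ih =>
    have hc : ((n:Int)+1) = ((n+1 : Nat) : Int) := by push_cast; ring
    rw [← hc, PySem.List.pyRange_one_succ_right (by exact_mod_cast Nat.zero_le n),
        List.foldl_append, ih]
    simp only [List.foldl]
    simp only [pvStepA, PySem.List.pyRange]
    simp [pvF_succ, pvDstA, ← rep_add_four, PySem.List.slice]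

theorem loopB (m n : Nat) (h : n ≤ m) :
    (PySem.List.pyRange 0 (n:Int)).foldl (pvStepB (List.replicate (4*m) 'q')) [] = pvF n := by
  induction n with
  | zero => norm_num [PySem.List.pyRange, pvF]
  | succ n ih =>
    have hc : ((n:Int)+1) = ((n+1 : Nat) : Int) := by push_cast; ring
    rw [← hc, PySem.List.pyRange_one_succ_right (by exact_mod_cast Nat.zero_le n),
        List.foldl_append, ih (Nat.le_of_succ_le h)]
    simp only [List.foldl]
    have h1 : (4*((n:Int)+1)) = ((4*(n+1) : Nat) : Int) := by push_cast; ring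
    have h2 : (4*(n:Int)) = ((4*n : Nat) : Int) := by push_cast; ring
    rw [pvStepB, h1, h2, PySem.List.slice_to_natCast, PySem.List.slice_to_natCast,
        List.take_replicate, List.take_replicate, pvF_succ]
    have hm1 : min (4*(n+1)) (4*m) = 4*(n+1) := by omega
    have hm2 : min (4*n) (4*m) = 4*n := by omega
    rw [hm1, hm2]

theorem pyRange_nonpos (num : Int) (h : num ≤ 0) : PySem.List.pyRange 0 num = [] := by
  simp [PySem.List.pyRange, h]

-- ===== VERDICT (by name: the statement is the Claim_ definition above) =====
theorem make_message_spec : Claim_equal_make_message := by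
  intro num _
  unfold Spec_make_message make_message make_message_alt
  by_cases h : num ≤ 0
  · rw [pyRange_nonpos num h]; rfl
  · have hn : num = ((num.toNat : Nat) : Int) := (Int.toNat_of_nonneg (by omega)).symm
    rw [hn]
    have h4 : (4*((num.toNat : Nat):Int)).toNat = 4*num.toNat := by
      rw [show (4*((num.toNat : Nat):Int)) = ((4*num.toNat : Nat) : Int) by push_cast; ring]
      exact Int.toNat_natCast _
    rw [h4, loopA, loopB num.toNat num.toNat (le_refl _)]
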